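-- pv_equiv track=rewrite | github.com/siawyoung/practice | completed/a-plus-b-equal-c-plus-d.py | find_equality
-- ===== SOURCE A (Python) =====
-- from collections import defaultdict
--
-- def find_equality(arr):
--     hash_map = defaultdict(list)
--     for i in range(len(arr)):
--         for j in range(i +1, len(arr)):
--
--             # if there are existing indices, check if any of the indices clash
--             # if it doesn't clash, we can return it
--             if hash_map[arr[i] + arr[j]]:
--                 indices = hash_map[arr[i] + arr[j]]
--                 for ind in indices:
--                     if ind[0] != i and ind[0] != j and ind[1] != i and ind[1] != j:
--                         return (ind, (i,j))
--
--             hash_map[arr[i] + arr[j]].append((i,j))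
-- ===== SOURCE B (Python) =====
-- def find_equality(arr):
--     n = len(arr)
--     # pass 1: index every pair by its sum, in lex order
--     buckets = {}
--     for i in range(n):
--         for j in range(i + 1, n):
--             buckets.setdefault(arr[i] + arr[j], []).append((i, j))
--     # pass 2: for each pair, scan only the strictly earlier pairs in its bucket
--     for i in range(n):
--         for j in range(i + 1, n):
--             for p in buckets[arr[i] + arr[j]]:
--                 if p == (i, j):
--                     break
--                 if i not in p and j not in p:
--                     return (p, (i, j))
--     return None
-- ===== Notes on version B (the rewrite author's own statement) =====
-- stated objective: alternative
-- what changed: Replaces A's interleaved build-and-check (dict grown while checking each pair against it) with two separated passes: first build the complete sum->pairs index, then rescan pairs in lex order, searching only the strictly earlier entries of each pair's bucket.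
import Mathlib
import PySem

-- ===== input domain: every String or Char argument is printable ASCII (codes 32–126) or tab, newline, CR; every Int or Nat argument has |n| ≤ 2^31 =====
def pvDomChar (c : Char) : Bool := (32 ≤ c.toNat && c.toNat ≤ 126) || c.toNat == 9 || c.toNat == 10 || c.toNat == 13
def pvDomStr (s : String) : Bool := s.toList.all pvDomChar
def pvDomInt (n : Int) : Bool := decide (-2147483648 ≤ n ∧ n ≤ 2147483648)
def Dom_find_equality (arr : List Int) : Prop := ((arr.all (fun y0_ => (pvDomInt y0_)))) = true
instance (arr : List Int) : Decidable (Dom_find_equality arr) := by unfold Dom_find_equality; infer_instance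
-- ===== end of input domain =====

-- B replaces A's interleaved build-and-check with two separated passes (build the full
-- sum->pairs index first, then scan each pair's bucket over strictly earlier entries);
-- objective: alternative decomposition, same cost.

-- ===== PORT A =====
-- the (i, j) pairs visited by the nested 'for i in range(n): for j in range(i+1, n)' loops, in order
def pvPairs (n : Int) : List (Int × Int) :=
  (PySem.List.pyRange 0 n 1).flatMap
    (fun i => (PySem.List.pyRange (i + 1) n 1).map (fun j => (i, j)))

-- 'ind[0] != i and ind[0] != j and ind[1] != i and ind[1] != j'
def pvClashFree (i j : Int) (p : Int × Int) : Bool :=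
  p.1 != i && p.1 != j && p.2 != i && p.2 != j

-- A's loop body over the remaining pairs, carrying the growing hash_map
-- (indices from the ranges are always in range, so pyGetD's default is never used)
def pvGoA (arr : List Int) (d : PySem.Dict Int (List (Int × Int))) :
    List (Int × Int) → Option ((Int × Int) × (Int × Int))
  | [] => none
  | (i, j) :: rest =>
    let s := PySem.List.pyGetD arr i 0 + PySem.List.pyGetD arr j 0
    let bucket := d.getD s []
    -- 'for ind in indices: if …: return (ind, (i,j))' is a first-match scan
    match bucket.find? (pvClashFree i j) with
    | some p => some (p, (i, j))
    | none => pvGoA arr (d.insert s (bucket ++ [(i, j)])) rest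

def find_equality (arr : List Int) : Option ((Int × Int) × (Int × Int)) :=
  pvGoA arr PySem.Dict.empty (pvPairs arr.length)

-- ===== PORT B =====
-- pass 1: buckets.setdefault(arr[i]+arr[j], []).append((i, j)) over all pairs
def pvBuild (arr : List Int) (ps : List (Int × Int)) : PySem.Dict Int (List (Int × Int)) :=
  ps.foldl
    (fun d p =>
      let s := PySem.List.pyGetD arr p.1 0 + PySem.List.pyGetD arr p.2 0
      d.insert s (d.getD s [] ++ [p]))
    PySem.Dict.empty

-- 'for p in bucket: if p == (i,j): break; if i not in p and j not in p: return p'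
def pvScan (i j : Int) : List (Int × Int) → Option (Int × Int)
  | [] => none
  | p :: rest =>
    if p = (i, j) then none
    else if !(p.1 == i || p.2 == i) && !(p.1 == j || p.2 == j) then some p
    else pvScan i j rest

-- pass 2 over the pairs, with the finished bucket index
def pvGoB (arr : List Int) (bk : PySem.Dict Int (List (Int × Int))) :
    List (Int × Int) → Option ((Int × Int) × (Int × Int))
  | [] => none
  | (i, j) :: rest =>
    match pvScan i j (bk.getD (PySem.List.pyGetD arr i 0 + PySem.List.pyGetD arr j 0) []) with
    | some p => some (p, (i, j))
    | none => pvGoB arr bk rest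

def find_equality_alt (arr : List Int) : Option ((Int × Int) × (Int × Int)) :=
  pvGoB arr (pvBuild arr (pvPairs arr.length)) (pvPairs arr.length)

-- ===== PRECONDITION & SPEC =====
def Spec_find_equality (arr : List Int) (out : Option ((Int × Int) × (Int × Int))) : Prop := out = find_equality_alt arr
instance (arr : List Int) (out : Option ((Int × Int) × (Int × Int))) : Decidable (Spec_find_equality arr out) := by unfold Spec_find_equality; infer_instance

-- ===== CLAIM (what is proved, stated in full; the proofs are below) =====
def Claim_equal_find_equality : Prop := ∀ (arr : List Int), Dom_find_equality arr → Spec_find_equality arr (find_equality arr)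

-- ===== LEMMAS AND PROOFS =====

-- the sum a pair is bucketed under
def pvSum (arr : List Int) (p : Int × Int) : Int :=
  PySem.List.pyGetD arr p.1 0 + PySem.List.pyGetD arr p.2 0

theorem pvPairs_nodup (n : Int) : (pvPairs n).Nodup := by
  unfold pvPairs
  refine List.nodup_flatMap.mpr ⟨?_, ?_⟩
  · intro i _
    exact (PySem.List.nodup_pyRange_one _ _).map (fun a b h => by
      simpa using congrArg Prod.snd h)
  · refine (PySem.List.nodup_pyRange_one 0 n).pairwise_of_forall_ne ?_
    intro a b _ _ hab x hxa hxb
    simp only [List.mem_map] at hxa hxb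
    obtain ⟨j1, _, rfl⟩ := hxa
    obtain ⟨j2, _, h2⟩ := hxb
    exact hab (congrArg Prod.fst h2).symm

-- the buckets built from a prefix are exactly the sum-filtered prefix
theorem pvBuild_getD (arr : List Int) (ps : List (Int × Int)) :
    ∀ (d : PySem.Dict Int (List (Int × Int))) (s : Int),
      (ps.foldl
        (fun d p =>
          let s := PySem.List.pyGetD arr p.1 0 + PySem.List.pyGetD arr p.2 0
          d.insert s (d.getD s [] ++ [p])) d).getD s []
      = d.getD s [] ++ ps.filter (fun p => pvSum arr p == s) := by
  induction ps with
  | nil => intro d s; simp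
  | cons p rest ih =>
    intro d s
    simp only [List.foldl_cons, List.filter_cons]
    rw [ih]
    by_cases h : pvSum arr p = s
    · simp [PySem.Dict.getD_insert, pvSum] at *
      rw [if_pos h.symm]  -- key s = inserted key
      simp [h]
    · have : ¬ s = PySem.List.pyGetD arr p.1 0 + PySem.List.pyGetD arr p.2 0 := by
        simpa [pvSum, eq_comm] using h
      simp [PySem.Dict.getD_insert, this, h]

-- scanning a bucket up to the sentinel (i, j) is a first-match search of the part before it
theorem pvScan_eq_find? (i j : Int) (l1 l2 : List (Int × Int)) (h : (i, j) ∉ l1) :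
    pvScan i j (l1 ++ (i, j) :: l2) = l1.find? (pvClashFree i j) := by
  induction l1 with
  | nil => simp [pvScan]
  | cons q t ih =>
    have hq : q ≠ (i, j) := fun hqe => h (hqe ▸ List.mem_cons_self)
    have ht : (i, j) ∉ t := fun hm => h (List.mem_cons_of_mem _ hm)
    simp only [List.cons_append, pvScan, List.find?_cons, if_neg hq]
    have hpred : (!(q.1 == i || q.2 == i) && !(q.1 == j || q.2 == j)) = pvClashFree i j q := by
      simp only [pvClashFree, bne]
      cases q.1 == i <;> cases q.2 == i <;> cases q.1 == j <;> cases q.2 == j <;> rfl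
    rw [hpred]
    cases hc : pvClashFree i j q with
    | true => simp
    | false => simpa using ih ht

-- main invariant: A with the buckets of the already-visited prefix agrees with B's second pass
theorem pvGoA_eq_pvGoB (arr : List Int) :
    ∀ (ps pre : List (Int × Int)), pvPairs arr.length = pre ++ ps →
      pvGoA arr (pvBuild arr pre) ps
        = pvGoB arr (pvBuild arr (pvPairs arr.length)) ps := by
  intro ps
  induction ps with
  | nil => intro pre _; simp [pvGoA, pvGoB]
  | cons hd rest ih =>
    intro pre hsplit
    obtain ⟨i, j⟩ := hd
    have hnodup : (pvPairs arr.length).Nodup := pvPairs_nodup _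
    have hnotpre : (i, j) ∉ pre := by
      rw [hsplit] at hnodup
      have := (List.nodup_append.mp hnodup).2.2
      intro hm
      exact this (i, j) hm (i, j) List.mem_cons_self rfl
    have hAbucket : (pvBuild arr pre).getD (pvSum arr (i, j)) []
        = pre.filter (fun p => pvSum arr p == pvSum arr (i, j)) := by
      unfold pvBuild; rw [pvBuild_getD]; simp
    have hBbucket : (pvBuild arr (pvPairs arr.length)).getD (pvSum arr (i, j)) []
        = pre.filter (fun p => pvSum arr p == pvSum arr (i, j))
          ++ (i, j) :: rest.filter (fun p => pvSum arr p == pvSum arr (i, j)) := by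
      unfold pvBuild; rw [pvBuild_getD]
      simp [hsplit, List.filter_append]
    have hnotfilter : (i, j) ∉ pre.filter (fun p => pvSum arr p == pvSum arr (i, j)) :=
      fun hm => hnotpre (List.mem_of_mem_filter hm)
    have hscan : pvScan i j
        ((pvBuild arr (pvPairs arr.length)).getD
          (PySem.List.pyGetD arr i 0 + PySem.List.pyGetD arr j 0) [])
        = ((pvBuild arr pre).getD (PySem.List.pyGetD arr i 0 + PySem.List.pyGetD arr j 0) []).find?
            (pvClashFree i j) := by
      have hs : PySem.List.pyGetD arr i 0 + PySem.List.pyGetD arr j 0 = pvSum arr (i, j) := rfl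
      rw [hs, hBbucket, hAbucket, pvScan_eq_find? _ _ _ _ hnotfilter]
    simp only [pvGoA, pvGoB, hscan]
    cases hf : ((pvBuild arr pre).getD
        (PySem.List.pyGetD arr i 0 + PySem.List.pyGetD arr j 0) []).find? (pvClashFree i j) with
    | some p => simp
    | none =>
      simp only []
      have hstep : (pvBuild arr pre).insert
          (PySem.List.pyGetD arr i 0 + PySem.List.pyGetD arr j 0)
          ((pvBuild arr pre).getD (PySem.List.pyGetD arr i 0 + PySem.List.pyGetD arr j 0) []
            ++ [(i, j)])
          = pvBuild arr (pre ++ [(i, j)]) := by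
        unfold pvBuild
        rw [List.foldl_append]
        rfl
      rw [hstep]
      exact ih (pre ++ [(i, j)]) (by simpa using hsplit)

-- ===== VERDICT (by name: the statement is the Claim_ definition above) =====
theorem find_equality_spec : Claim_equal_find_equality := by
  intro arr _
  unfold Spec_find_equality find_equality find_equality_alt
  have := pvGoA_eq_pvGoB arr (pvPairs arr.length) [] (by simp)
  simpa [pvBuild] using this
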